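-- pv_equiv track=rewrite | github.com/cherry2250/Algo_practice | 프로그래머스/택배상자.py | solution
-- ===== SOURCE A (Python) =====
-- def solution(order):
--     truck = []
--     idx = 1
--     now = 0
--     while idx < len(order) + 1:
--         truck.append(idx)
--         while truck[-1] == order[now]:
--             now += 1
--             truck.pop()
--             if len(truck) == 0 :
--                 break
--         idx += 1
--
--     return now
-- ===== SOURCE B (Python) =====
-- def solution(order):
--     n = len(order)
--     delivered = [False] * (n + 1)   # delivered[k] for box k (1..n)
--     box = 1                         # next box not yet pushed
--     count = 0
--     for t in order:
--         if box <= t <= n: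
--             # t has not been pushed yet: it can be taken straight off the belt
--             delivered[t] = True
--             box = t + 1
--         else:
--             # t can only be the largest already-pushed undelivered box
--             top = box - 1
--             while top >= 1 and delivered[top]:
--                 top -= 1
--             if top >= 1 and top == t:
--                 delivered[top] = True
--             else:
--                 return count
--         count += 1
--     return count
-- ===== Notes on version B (the rewrite author's own statement) =====
-- stated objective: alternative
-- what changed: Replaced A's explicit stack simulation (push every box one by one, pop while the top matches) by a stack-free formulation: a boolean delivered-flags array plus a max-pushed counter that jumps directly to each fresh target, with the current stack top recomputed as the largest undelivered pushed box by a downward scan.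
import Mathlib
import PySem

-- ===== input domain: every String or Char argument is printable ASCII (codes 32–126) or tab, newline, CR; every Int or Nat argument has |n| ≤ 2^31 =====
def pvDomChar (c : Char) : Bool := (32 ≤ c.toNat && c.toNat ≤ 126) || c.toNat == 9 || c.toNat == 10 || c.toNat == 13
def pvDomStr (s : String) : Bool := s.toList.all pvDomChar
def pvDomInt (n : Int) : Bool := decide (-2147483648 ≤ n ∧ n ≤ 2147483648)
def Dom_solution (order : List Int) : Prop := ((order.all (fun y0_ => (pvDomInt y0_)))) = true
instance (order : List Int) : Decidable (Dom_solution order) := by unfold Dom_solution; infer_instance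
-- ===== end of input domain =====

-- B replaces A's stack simulation by a delivered-flags array plus a downward scan for the
-- current top (no stack at all); same return value, different data structure (objective: alternative).

-- ===== PORT A =====
-- inner 'while truck[-1] == order[now]: now += 1; truck.pop(); if len(truck)==0: break'
-- (the empty-stack break is the [] case; order[now] is PySem.List.pyGet? order (now : Int), exact wherever Python returns)
-- Python's stack is represented head-as-top (append/pop at the end ↔ cons/tail here).
def popA (order : List Int) : List Int → Nat → List Int × Nat
  | [], now => ([], now)
  | t :: rest, now =>
    if PySem.List.pyGet? order (now : Int) = some t then popA order rest (now + 1) else (t :: rest, now)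

-- outer 'while idx < len(order) + 1: truck.append(idx); <inner loop>; idx += 1'
def loopA (order : List Int) (truck : List Int) (idx now : Nat) : Nat :=
  if idx < order.length + 1 then
    let s := popA order ((idx : Int) :: truck) now
    loopA order s.1 (idx + 1) s.2
  else now
termination_by order.length + 1 - idx

def solution (order : List Int) : Int := (loopA order [] 1 0 : Int)

-- ===== PORT B =====
-- 'top = box - 1; while top >= 1 and delivered[top]: top -= 1'
def topScan (delivered : List Bool) : Nat → Nat
  | 0 => 0
  | b+1 => if delivered.getD (b+1) false = true then topScan delivered b else b+1

-- 'for t in order: if box <= t <= n: delivered[t]=True; box=t+1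
--  else: <topScan>; if top>=1 and top==t: delivered[top]=True else: return count'
def loopB (n : Nat) (delivered : List Bool) (box : Nat) (count : Nat) : List Int → Int
  | [] => (count : Int)
  | t :: rest =>
    if (box : Int) ≤ t ∧ t ≤ (n : Int) then
      loopB n (delivered.set t.toNat true) (t.toNat + 1) (count + 1) rest
    else
      let top := topScan delivered (box - 1)
      if 1 ≤ top ∧ (top : Int) = t then loopB n (delivered.set top true) box (count + 1) rest
      else (count : Int)

def solution_alt (order : List Int) : Int :=
  loopB order.length (List.replicate (order.length + 1) false) 1 0 order

-- ===== PRECONDITION & SPEC =====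
def Spec_solution (order : List Int) (out : Int) : Prop := out = solution_alt order
instance (order : List Int) (out : Int) : Decidable (Spec_solution order out) := by unfold Spec_solution; infer_instance

-- ===== CLAIM (what is proved, stated in full; the proofs are below) =====
def Claim_equal_solution : Prop := ∀ (order : List Int), Dom_solution order → Spec_solution order (solution order)

-- ===== LEMMAS AND PROOFS =====

-- intermediate machine for the proof only (NOT a port): the lazy-push stack machine;
-- A is proved equal to it, and it is proved equal to B.
def fillL (n : Nat) (stack : List Int) (box : Nat) (target : Int) : List Int × Nat :=
  if box ≤ n ∧ stack.head? ≠ some target then fillL n ((box : Int) :: stack) (box + 1) target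
  else (stack, box)
termination_by n + 1 - box

def loopL (n : Nat) : List Int → Nat → List Int → Nat → Int
  | [], _, _, _ => (n : Int)
  | t :: rest, i, stack, box =>
    let s := fillL n stack box t
    if s.1.head? = some t then loopL n rest (i + 1) s.1.tail s.2 else (i : Int)

-- the inner-loop exit condition of A: the stack top (if any) does not match the current target
def Mis (order truck : List Int) (now : Nat) : Prop :=
  ∀ t, truck.head? = some t → order[now]? ≠ some t

lemma popA_cons_match (order : List Int) (t : Int) (rest : List Int) (now : Nat)
    (h : order[now]? = some t) :
    popA order (t :: rest) now = popA order rest (now + 1) := by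
  have h' : PySem.List.pyGet? order (now : Int) = some t := by
    simpa [PySem.List.pyGet?_natCast] using h
  simp only [popA]; rw [if_pos h']

lemma popA_cons_nomatch (order : List Int) (t : Int) (rest : List Int) (now : Nat)
    (h : order[now]? ≠ some t) :
    popA order (t :: rest) now = (t :: rest, now) := by
  have h' : ¬ PySem.List.pyGet? order (now : Int) = some t := by
    simpa [PySem.List.pyGet?_natCast] using h
  simp only [popA]; rw [if_neg h']

lemma popA_inv (order : List Int) : ∀ (truck : List Int) (now : Nat),
    (popA order truck now).2 + (popA order truck now).1.length = now + truck.length := by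
  intro truck
  induction truck with
  | nil => intro now; simp [popA]
  | cons t rest ih =>
    intro now
    by_cases h : order[now]? = some t
    · rw [popA_cons_match order t rest now h]
      have := ih (now + 1); simp at this ⊢; omega
    · rw [popA_cons_nomatch order t rest now h]

lemma popA_mis (order : List Int) : ∀ (truck : List Int) (now : Nat),
    Mis order (popA order truck now).1 (popA order truck now).2 := by
  intro truck
  induction truck with
  | nil => intro now t ht; simp [popA] at ht
  | cons t rest ih =>
    intro now
    by_cases h : order[now]? = some t
    · rw [popA_cons_match order t rest now h]; exact ih (now + 1)
    · rw [popA_cons_nomatch order t rest now h]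
      intro u hu; simp at hu; rw [← hu]; exact h

-- when A pops, the lazy machine performs the matching loop iterations with empty fills
lemma popA_loopL (order : List Int) (b : Nat) : ∀ (truck : List Int) (now : Nat),
    loopL order.length (order.drop now) now truck b
      = loopL order.length (order.drop (popA order truck now).2) (popA order truck now).2
          (popA order truck now).1 b := by
  intro truck
  induction truck with
  | nil => intro now; simp [popA]
  | cons t rest ih =>
    intro now
    by_cases h : order[now]? = some t
    · rw [popA_cons_match order t rest now h]
      obtain ⟨hlt, hval⟩ := List.getElem?_eq_some_iff.mp h
      have hdrop : order.drop now = t :: order.drop (now + 1) := by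
        rw [List.drop_eq_getElem_cons hlt, hval]
      rw [hdrop, loopL]
      have hfill : fillL order.length (t :: rest) b t = (t :: rest, b) := by
        rw [fillL]; simp
      rw [hfill]
      simp only [List.head?_cons, List.tail_cons, if_true]
      exact ih (now + 1)
    · rw [popA_cons_nomatch order t rest now h]

-- one lazy push of the fill loop
lemma fillL_step (n : Nat) (stack : List Int) (box : Nat) (target : Int)
    (h1 : box ≤ n) (h2 : stack.head? ≠ some target) :
    fillL n stack box target = fillL n ((box : Int) :: stack) (box + 1) target := by
  rw [fillL]; simp [h1, h2]

-- correspondence between A's eager outer loop and the lazy machine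
lemma bridge (order : List Int) : ∀ (m idx now : Nat) (truck : List Int),
    idx + m = order.length + 1 → now + truck.length + 1 = idx → Mis order truck now →
    (loopA order truck idx now : Int) = loopL order.length (order.drop now) now truck idx := by
  intro m
  induction m with
  | zero =>
    intro idx now truck hm hinv hmis
    rw [loopA, if_neg (by omega)]
    rcases truck with _ | ⟨t, rest⟩
    · have hnow : now = order.length := by simp at hinv; omega
      subst hnow
      simp [loopL]
    · have hlt : now < order.length := by simp at hinv; omega
      have hdrop : order.drop now = order[now] :: order.drop (now + 1) :=
        List.drop_eq_getElem_cons hlt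
      rw [hdrop, loopL]
      have hfill : fillL order.length (t :: rest) idx order[now] = (t :: rest, idx) := by
        rw [fillL]; simp; intro hle; omega
      have hget : order[now]? = some order[now] := List.getElem?_eq_getElem hlt
      have hhd : ¬ ((t :: rest).head? = some (order[now])) := fun hc => hmis _ hc hget
      rw [hfill]
      simp only [if_neg hhd]
  | succ k ih =>
    intro idx now truck hm hinv hmis
    have hidx : idx < order.length + 1 := by omega
    have hnow : now < order.length := by omega
    have hget : order[now]? = some order[now] := List.getElem?_eq_getElem hnow
    have hdrop : order.drop now = order[now] :: order.drop (now + 1) :=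
      List.drop_eq_getElem_cons hnow
    rw [loopA, if_pos hidx]
    have hhd : truck.head? ≠ some (order[now]) := fun hc => hmis _ hc hget
    have hLstep : loopL order.length (order.drop now) now truck idx
        = loopL order.length (order.drop now) now ((idx : Int) :: truck) (idx + 1) := by
      rw [hdrop, loopL, loopL, fillL_step order.length truck idx order[now] (by omega) hhd]
    rw [hLstep, popA_loopL order (idx + 1) ((idx : Int) :: truck) now]
    have hinv' := popA_inv order ((idx : Int) :: truck) now
    exact ih (idx + 1) (popA order ((idx : Int) :: truck) now).2
      (popA order ((idx : Int) :: truck) now).1 (by omega)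
      (by simp at hinv'; omega) (popA_mis order _ now)

-- the stack that the delivered-flags state (d, box) represents: undelivered boxes 1..b, top first
def stackOf (d : List Bool) : Nat → List Int
  | 0 => []
  | b+1 => if d.getD (b+1) false = true then stackOf d b else ((b+1 : Nat) : Int) :: stackOf d b

lemma stackOf_zero (d : List Bool) : stackOf d 0 = [] := rfl

lemma stackOf_succ (d : List Bool) (b : Nat) :
    stackOf d (b+1)
      = if d.getD (b+1) false = true then stackOf d b else ((b+1 : Nat) : Int) :: stackOf d b := rfl

lemma getD_set_ne (d : List Bool) (i j : Nat) (v : Bool) (h : i ≠ j) :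
    (d.set i v).getD j false = d.getD j false := by
  simp [List.getD, List.getElem?_set_ne h]

lemma stackOf_set_high (d : List Bool) (j : Nat) (v : Bool) : ∀ b, b < j →
    stackOf (d.set j v) b = stackOf d b := by
  intro b
  induction b with
  | zero => intro _; simp [stackOf]
  | succ b ih =>
    intro h
    simp only [stackOf, getD_set_ne d j (b+1) v (by omega), ih (by omega)]

lemma stackOf_mem (d : List Bool) : ∀ b x, x ∈ stackOf d b → 1 ≤ x ∧ x ≤ (b : Int) := by
  intro b
  induction b with
  | zero => intro x hx; simp [stackOf] at hx
  | succ b ih =>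
    intro x hx
    simp only [stackOf] at hx
    split at hx
    · have := ih x hx; push_cast; omega
    · rcases List.mem_cons.mp hx with h | h
      · subst h; push_cast; omega
      · have := ih x h; push_cast; omega

lemma stackOf_head (d : List Bool) : ∀ b,
    (stackOf d b).head? = if topScan d b = 0 then none else some ((topScan d b : Nat) : Int) := by
  intro b
  induction b with
  | zero => simp [stackOf, topScan]
  | succ b ih =>
    simp only [stackOf, topScan]
    split
    · exact ih
    · simp

lemma topScan_le (d : List Bool) : ∀ b, topScan d b ≤ b := by
  intro b
  induction b with
  | zero => simp [topScan]
  | succ b ih => simp only [topScan]; split <;> omega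

lemma topScan_above (d : List Bool) : ∀ b k, topScan d b < k → k ≤ b → d.getD k false = true := by
  intro b
  induction b with
  | zero => intro k h1 h2; omega
  | succ b ih =>
    intro k h1 h2
    simp only [topScan] at h1
    split at h1
    · rcases Nat.lt_or_ge k (b+1) with h | h
      · exact ih k h1 (by omega)
      · have : k = b + 1 := by omega
        subst this; assumption
    · omega

lemma stackOf_eq_top (d : List Bool) : ∀ b, 1 ≤ topScan d b →
    stackOf d b = ((topScan d b : Nat) : Int) :: stackOf d (topScan d b - 1) := by
  intro b
  induction b with
  | zero => intro h; simp [topScan] at h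
  | succ b ih =>
    intro h
    simp only [topScan] at h ⊢
    by_cases hd : d.getD (b+1) false = true
    · rw [if_pos hd] at h ⊢
      rw [stackOf_succ, if_pos hd]
      exact ih h
    · rw [if_neg hd] at h ⊢
      rw [stackOf_succ, if_neg hd]
      rfl

-- skipping delivered boxes at the top of the range does not change the stack
lemma stackOf_skip (d : List Bool) (t : Nat) : ∀ b, t ≤ b →
    (∀ k, t < k → k ≤ b → d.getD k false = true) → stackOf d b = stackOf d t := by
  intro b
  induction b with
  | zero => intro h _; rw [show t = 0 by omega]
  | succ b ih =>
    intro h hk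
    rcases Nat.lt_or_ge t (b+1) with h' | h'
    · have : d.getD (b+1) false = true := hk (b+1) h' (by omega)
      simp only [stackOf, this, if_pos]
      exact ih (by omega) (fun k hk1 hk2 => hk k hk1 (by omega))
    · have : t = b + 1 := by omega
      subst this; rfl

-- delivering box j removes it from the represented stack
lemma stackOf_set_self (d : List Bool) (j : Nat) (hj : 1 ≤ j) (hlen : j < d.length) :
    stackOf (d.set j true) j = stackOf d (j - 1) := by
  obtain ⟨b, rfl⟩ : ∃ b, j = b + 1 := ⟨j - 1, by omega⟩
  rw [stackOf_succ]
  have hget : (d.set (b+1) true).getD (b+1) false = true := by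
    simp [List.getD, hlen]
  rw [if_pos hget, stackOf_set_high d (b+1) true b (by omega)]
  rfl

-- the fill loop on the represented stack, deliver branch: pushes box..t and stops
lemma fill_deliver (n : Nat) (d : List Bool) (t : Nat) (ht : t ≤ n) :
    ∀ j box, 1 ≤ box → box + j = t →
    (∀ k, box ≤ k → d.getD k false = false) →
    fillL n (stackOf d (box - 1)) box ((t : Nat) : Int) = (((t : Nat) : Int) :: stackOf d (t - 1), t + 1) := by
  intro j
  induction j with
  | zero =>
    intro box hb1 hbt hund
    subst hbt
    simp only [Nat.add_zero] at *
    rw [fillL]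
    have hhd : (stackOf d (box - 1)).head? ≠ some ((box : Nat) : Int) := by
      intro hc
      have hm := stackOf_mem d (box - 1) _ (List.mem_of_mem_head? hc)
      push_cast at hm; omega
    rw [if_pos ⟨ht, hhd⟩]
    rw [fillL]
    simp
  | succ j ih =>
    intro box hb1 hbt hund
    have hbn : box ≤ n := by omega
    have hhd : (stackOf d (box - 1)).head? ≠ some ((t : Nat) : Int) := by
      intro hc
      have hm := stackOf_mem d (box - 1) _ (List.mem_of_mem_head? hc)
      push_cast at hm; omega
    rw [fillL, if_pos ⟨hbn, hhd⟩]
    have hbox : ((box : Nat) : Int) :: stackOf d (box - 1) = stackOf d box := by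
      have : d.getD box false = false := hund box le_rfl
      have hb : box = (box - 1) + 1 := by omega
      rw [hb] ; simp only [stackOf, (hb ▸ this : d.getD ((box-1)+1) false = false)]
      simp
    rw [hbox]
    have := ih (box + 1) (by omega) (by omega) (fun k hk => hund k (by omega))
    simpa using this

-- the fill loop never produces the target on top when the target is unreachable
lemma fill_no_match (n : Nat) (t : Int) : ∀ j box (s : List Int), n + 1 - box = j →
    s.head? ≠ some t → (∀ x ∈ s, x < (box : Int)) → (t < (box : Int) ∨ (n : Int) < t) →
    (fillL n s box t).1.head? ≠ some t := by
  intro j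
  induction j with
  | zero =>
    intro box s hj hs _ _
    rw [fillL, if_neg]
    · exact hs
    · intro hc; omega
  | succ j ih =>
    intro box s hj hs hb ht
    rw [fillL]
    split
    · apply ih (box + 1) (((box : Nat) : Int) :: s) (by omega)
      · simp only [List.head?_cons, ne_eq, Option.some.injEq]
        intro hc; subst hc; omega
      · intro x hx
        rcases List.mem_cons.mp hx with h | h
        · subst h; push_cast; omega
        · have := hb x h; omega
      · push_cast at ht ⊢; omega
    · exact hs

-- main correspondence: the lazy machine equals B's delivered-flags loop
lemma lazy_eq_B (n : Nat) : ∀ (ts : List Int) (i box : Nat) (d : List Bool),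
    d.length = n + 1 → 1 ≤ box → box ≤ n + 1 →
    (∀ k, box ≤ k → d.getD k false = false) →
    i + ts.length = n →
    loopL n ts i (stackOf d (box - 1)) box = loopB n d box i ts := by
  intro ts
  induction ts with
  | nil =>
    intro i box d _ _ _ _ hlen
    simp at hlen
    simp [loopL, loopB, hlen]
  | cons t rest ih =>
    intro i box d hd hb1 hb2 hund hlen
    rw [loopL, loopB]
    by_cases h1 : (box : Int) ≤ t ∧ t ≤ (n : Int)
    · rw [if_pos h1]
      obtain ⟨ha, hb⟩ := h1
      set tn := t.toNat with htn
      have htval : t = (tn : Int) := by rw [htn]; omega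
      have htn_le : tn ≤ n := by omega
      have hbtn : box ≤ tn := by omega
      have hfill := fill_deliver n d tn htn_le (tn - box) box hb1 (by omega) hund
      rw [htval, hfill]
      simp only [List.head?_cons, List.tail_cons, if_true]
      have hset : stackOf (d.set tn true) ((tn + 1) - 1) = stackOf d (tn - 1) := by
        have h1' : (tn + 1) - 1 = tn := by omega
        rw [h1', stackOf_set_self d tn (by omega) (by omega)]
      have := ih (i + 1) (tn + 1) (d.set tn true)
        (by simp [hd]) (by omega) (by omega)
        (by intro k hk
            rw [getD_set_ne d tn k true (by omega)]
            exact hund k (by omega))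
        (by simp at hlen ⊢; omega)
      rw [hset] at this
      exact this
    · rw [if_neg h1]
      set top := topScan d (box - 1) with htop
      by_cases h2 : 1 ≤ top ∧ (top : Int) = t
      · rw [if_pos h2]
        obtain ⟨h2a, h2b⟩ := h2
        have hstack : stackOf d (box - 1) = ((top : Nat) : Int) :: stackOf d (top - 1) :=
          stackOf_eq_top d (box - 1) h2a
        have hfill : fillL n (stackOf d (box - 1)) box t = (stackOf d (box - 1), box) := by
          rw [fillL, if_neg]
          intro hc
          exact hc.2 (by rw [hstack, h2b]; simp)
        rw [hfill]
        simp only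
        rw [hstack]
        simp only [List.head?_cons, List.tail_cons, h2b, if_true]
        have htople : top ≤ box - 1 := topScan_le d (box - 1)
        have hset : stackOf (d.set top true) (box - 1) = stackOf d (top - 1) := by
          rw [stackOf_skip (d.set top true) top (box - 1) htople
              (by intro k hk1 hk2
                  rw [getD_set_ne d top k true (by omega)]
                  exact topScan_above d (box - 1) k hk1 hk2)]
          exact stackOf_set_self d top (by omega) (by omega)
        have := ih (i + 1) box (d.set top true) (by simp [hd]) hb1 hb2
          (by intro k hk
              rw [getD_set_ne d top k true (by omega)]
              exact hund k hk)
          (by simp at hlen ⊢; omega)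
        rw [hset] at this
        exact this
      · rw [if_neg h2]
        have hs : (stackOf d (box - 1)).head? ≠ some t := by
          rw [stackOf_head]
          split
          · simp
          · rename_i hz
            simp only [ne_eq, Option.some.injEq]
            intro hc
            exact h2 ⟨by omega, hc⟩
        have hnm := fill_no_match n t (n + 1 - box) box (stackOf d (box - 1)) rfl hs
          (by intro x hx
              have := stackOf_mem d (box - 1) x hx
              push_cast at this; omega)
          (by omega)
        exact if_neg hnm

-- ===== VERDICT (by name: the statement is the Claim_ definition above) =====
theorem solution_spec : Claim_equal_solution := by
  intro order _
  unfold Spec_solution solution solution_alt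
  have h1 := bridge order order.length 1 0 [] (by omega) (by simp) (by intro t ht; simp at ht)
  have h2 := lazy_eq_B order.length order 0 1 (List.replicate (order.length + 1) false)
    (by simp) le_rfl (by omega)
    (by intro k _
        rcases Nat.lt_or_ge k (order.length + 1) with h | h
        · simp [List.getD, h]
        · simp [List.getD, List.getElem?_eq_none (by simp; omega : (List.replicate (order.length + 1) false).length ≤ k)])
    (by omega)
  rw [(by omega : (1:Nat) - 1 = 0), stackOf_zero] at h2
  simpa using h1.trans h2
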